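-- pv_equiv track=rewrite | github.com/123xxgamer/list-graphs | listStuff.py | bar_graph_scaled
-- ===== SOURCE A (Python) =====
-- def bar_graph(g):
--     s = ''
--     i=0
--     for cur in g:
--         s+=str(i)+': '+('='*cur)+'''
-- '''
--         i+=1
--     return s
--
-- def bar_graph_scaled(g, scale_factor):
--     s = ''
--     i=0
--     while i<len(g):
--         g[i]//=scale_factor
--         i+=1
--     s=bar_graph(g)
--     return s
-- ===== SOURCE B (Python) =====
-- def bar_graph_scaled(g, scale_factor):
--     out = []
--     for i in range(len(g)):
--         g[i] //= scale_factor
--         out.append(str(i) + ': ' + '=' * g[i] + '\n')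
--     return ''.join(out)
-- ===== Notes on version B (the rewrite author's own statement) =====
-- stated objective: simpler
-- what changed: B fuses A's two passes (in-place scaling loop, then the bar_graph rendering loop with a string accumulator) into one loop over indices that scales g[i] and emits its line in the same iteration, collecting lines in a list joined once at the end; g is still mutated in place.
import Mathlib
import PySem

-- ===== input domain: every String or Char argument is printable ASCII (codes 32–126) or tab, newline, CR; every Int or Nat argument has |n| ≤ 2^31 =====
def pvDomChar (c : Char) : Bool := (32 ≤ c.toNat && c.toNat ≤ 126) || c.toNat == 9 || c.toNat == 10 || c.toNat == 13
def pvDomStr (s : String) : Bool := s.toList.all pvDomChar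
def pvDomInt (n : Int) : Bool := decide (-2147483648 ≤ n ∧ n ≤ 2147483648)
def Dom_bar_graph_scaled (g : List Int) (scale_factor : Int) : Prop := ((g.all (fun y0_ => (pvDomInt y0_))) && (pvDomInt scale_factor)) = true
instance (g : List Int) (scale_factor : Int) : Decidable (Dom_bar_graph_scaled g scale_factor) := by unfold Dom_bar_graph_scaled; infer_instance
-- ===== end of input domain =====

-- B fuses A's scale pass and render pass into one loop that joins the collected lines;
-- equivalence is about the return value (both Pythons mutate g in place identically).

-- ===== PORT A =====
-- helper bar_graph: for cur in g: s += str(i) + ': ' + '='*cur + '\n'; i += 1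
def pvBarGraph (g : List Int) : String :=
  (g.foldl
    (fun (p : String × Int) cur =>
      (p.1 ++ PySem.Int.toStr p.2 ++ ": " ++ String.mk (PySem.List.pyRepeat ['='] cur) ++ "\n",
       p.2 + 1))
    ("", 0)).1

def bar_graph_scaled (g : List Int) (scale_factor : Int) : String :=
  -- while i < len(g): g[i] //= scale_factor  — element-wise in-place update = map
  pvBarGraph (g.map (fun x => PySem.Int.floordiv x scale_factor))

-- ===== PORT B =====
-- for i in range(len(g)): g[i] //= sf; out.append(str(i)+': '+'='*g[i]+'\n'); return ''.join(out)
def pvAltGo (sf : Int) (i : Int) : List Int → List String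
  | [] => []
  | x :: xs =>
    (PySem.Int.toStr i ++ ": " ++ String.mk (PySem.List.pyRepeat ['='] (PySem.Int.floordiv x sf)) ++ "\n")
      :: pvAltGo sf (i + 1) xs

def bar_graph_scaled_alt (g : List Int) (scale_factor : Int) : String :=
  String.join (pvAltGo scale_factor 0 g)

-- ===== PRECONDITION & SPEC =====
-- Pre_ excludes exactly the inputs where A raises ZeroDivisionError (a division happens iff g is nonempty).
def Pre_bar_graph_scaled (g : List Int) (scale_factor : Int) : Prop := g = [] ∨ scale_factor ≠ 0
instance (g : List Int) (scale_factor : Int) : Decidable (Pre_bar_graph_scaled g scale_factor) := by unfold Pre_bar_graph_scaled; infer_instance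
def pvWitness_bar_graph_scaled : List Int × Int := ([4, -3, 0], 2)

def Spec_bar_graph_scaled (g : List Int) (scale_factor : Int) (out : String) : Prop := out = bar_graph_scaled_alt g scale_factor
instance (g : List Int) (scale_factor : Int) (out : String) : Decidable (Spec_bar_graph_scaled g scale_factor out) := by unfold Spec_bar_graph_scaled; infer_instance

-- ===== CLAIM (what is proved, stated in full; the proofs are below) =====
def Claim_equal_bar_graph_scaled : Prop := ∀ (g : List Int) (scale_factor : Int), Dom_bar_graph_scaled g scale_factor → Pre_bar_graph_scaled g scale_factor → Spec_bar_graph_scaled g scale_factor (bar_graph_scaled g scale_factor)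

-- ===== LEMMAS AND PROOFS =====

theorem pvFoldl_append (l : List String) (a : String) :
    l.foldl (fun r s => r ++ s) a = a ++ l.foldl (fun r s => r ++ s) "" := by
  induction l generalizing a with
  | nil => simp
  | cons x xs ih => simp only [List.foldl_cons]; rw [ih, ih ("" ++ x)]; simp [String.append_assoc]

-- the fold of A over the scaled list, started at (s, i), appends exactly B's lines from index i
theorem pvBar_fold_eq (sf : Int) (g : List Int) (s : String) (i : Int) :
    ((g.map (fun x => PySem.Int.floordiv x sf)).foldl
      (fun (p : String × Int) cur =>
        (p.1 ++ PySem.Int.toStr p.2 ++ ": " ++ String.mk (PySem.List.pyRepeat ['='] cur) ++ "\n",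
         p.2 + 1))
      (s, i)).1 = s ++ String.join (pvAltGo sf i g) := by
  induction g generalizing s i with
  | nil => simp [pvAltGo, String.join]
  | cons x xs ih =>
      simp only [List.map_cons, List.foldl_cons, pvAltGo, String.join, List.foldl_cons]
      rw [ih]
      simp only [String.join]
      conv_rhs => rw [pvFoldl_append]
      simp [String.append_assoc]

-- ===== VERDICT (by name: the statement is the Claim_ definition above) =====
theorem bar_graph_scaled_spec : Claim_equal_bar_graph_scaled := by
  intro g sf _ _
  unfold Spec_bar_graph_scaled bar_graph_scaled bar_graph_scaled_alt pvBarGraph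
  rw [pvBar_fold_eq sf g "" 0]
  simp
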